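-- pv_equiv track=rewrite | github.com/causalgraph/causRCA | eval/rca/helpers_rca_eval.py | get_in_k_counters
-- ===== SOURCE A (Python) =====
-- def get_in_k_counters(ground_truth: list, predictions: list, max_k: int=5) -> dict:
--     """
--     Get counters for correct predictions in top-k.
--
--     :param ground_truth: List of ground truth values.
--     :type ground_truth: list
--     :param predictions: List of predicted values.
--     :type predictions: list
--     :param max_k: Maximum k value to check.
--     :type max_k: int
--     :return: Dictionary with counts for in_1, in_2, ..., in_k.
--     :rtype: dict
--     """
--     n_true_vars = len(ground_truth)
--     in_k_counters = {}
--
--     for k in range(1, max_k + 1):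
--
--         # Ensure that k does not exceed the length of predictions
--         check_length = min(len(predictions), n_true_vars + (k - 1))
--
--         # Check if all ground truth elements are in the first check_length predictions
--         if all(true_var in predictions[:check_length] for true_var in ground_truth):
--             in_k_counters[f"in_{k}"] = 1
--         else:
--             in_k_counters[f"in_{k}"] = 0
--
--     return in_k_counters
-- ===== SOURCE B (Python) =====
-- def get_in_k_counters(ground_truth: list, predictions: list, max_k: int=5) -> dict:
--     # Precompute first-occurrence indices of predictions; the whole ground truth
--     # lies in a prefix iff the prefix covers the largest such first index.
--     first = {}
--     for i, p in enumerate(predictions):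
--         if p not in first:
--             first[p] = i
--     needed = 0  # minimal prefix length containing all ground truth (None = never)
--     for t in ground_truth:
--         idx = first.get(t)
--         if idx is None or needed is None:
--             needed = None
--         else:
--             needed = max(needed, idx + 1)
--     n_true_vars = len(ground_truth)
--     in_k_counters = {}
--     for k in range(1, max_k + 1):
--         check_length = min(len(predictions), n_true_vars + (k - 1))
--         in_k_counters[f"in_{k}"] = 1 if (needed is not None and needed <= check_length) else 0
--     return in_k_counters
-- ===== Notes on version B (the rewrite author's own statement) =====
-- stated objective: faster
-- what changed: B precomputes a first-occurrence index dict over predictions and the maximal required prefix length over the ground truth once, so each k is answered by one integer comparison instead of re-scanning a prediction prefix for every ground-truth element.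
import Mathlib
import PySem

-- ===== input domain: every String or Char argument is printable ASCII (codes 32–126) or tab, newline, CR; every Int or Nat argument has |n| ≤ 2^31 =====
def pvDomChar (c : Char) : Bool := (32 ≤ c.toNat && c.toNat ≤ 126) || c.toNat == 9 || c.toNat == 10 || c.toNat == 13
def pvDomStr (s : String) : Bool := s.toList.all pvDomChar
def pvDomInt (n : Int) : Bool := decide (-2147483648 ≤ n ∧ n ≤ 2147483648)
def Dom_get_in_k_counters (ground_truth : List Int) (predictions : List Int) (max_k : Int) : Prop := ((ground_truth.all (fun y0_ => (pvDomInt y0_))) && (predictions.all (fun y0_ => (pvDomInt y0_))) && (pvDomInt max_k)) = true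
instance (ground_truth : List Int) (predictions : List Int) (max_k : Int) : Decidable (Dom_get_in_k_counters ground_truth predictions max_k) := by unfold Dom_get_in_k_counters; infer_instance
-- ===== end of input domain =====

-- B replaces A's per-k rescan of a prediction prefix by a precomputed first-occurrence
-- index dict and the maximal required prefix length, answering each k in O(1) (faster).

-- ===== PORT A =====
def get_in_k_counters (ground_truth : List Int) (predictions : List Int) (max_k : Int) : List (String × Int) :=
  ((PySem.List.pyRange 1 (max_k + 1) 1).foldl (fun d k =>
      if ground_truth.all (fun true_var =>
          decide (true_var ∈ PySem.List.slice predictions none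
            (some (min (PySem.List.len predictions) (PySem.List.len ground_truth + (k - 1)))))) then
        d.insert ("in_" ++ PySem.Int.toStr k) 1
      else
        d.insert ("in_" ++ PySem.Int.toStr k) 0) PySem.Dict.empty).items

-- ===== PORT B =====
-- first-occurrence index of each prediction (the `first` dict loop of Source B)
def pvFirstIdx (predictions : List Int) : PySem.Dict Int Int :=
  (PySem.List.enumerate predictions 0).foldl
    (fun d ip => if d.contains ip.2 then d else d.insert ip.2 ip.1) PySem.Dict.empty

-- minimal prefix length covering all ground truth; none = some element never predicted
def pvNeeded (first : PySem.Dict Int Int) (ground_truth : List Int) : Option Int :=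
  ground_truth.foldl (fun acc t =>
    match first.get? t, acc with
    | some i, some m => some (max m (i + 1))
    | _, _ => none) (some 0)

def get_in_k_counters_alt (ground_truth : List Int) (predictions : List Int) (max_k : Int) : List (String × Int) :=
  let needed := pvNeeded (pvFirstIdx predictions) ground_truth
  ((PySem.List.pyRange 1 (max_k + 1) 1).foldl (fun d k =>
      d.insert ("in_" ++ PySem.Int.toStr k)
        (match needed with
         | some m =>
             if m ≤ min (PySem.List.len predictions) (PySem.List.len ground_truth + (k - 1))
             then 1 else 0
         | none => 0)) PySem.Dict.empty).items

-- ===== PRECONDITION & SPEC =====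
def Spec_get_in_k_counters (ground_truth : List Int) (predictions : List Int) (max_k : Int) (out : List (String × Int)) : Prop := out = get_in_k_counters_alt ground_truth predictions max_k
instance (ground_truth : List Int) (predictions : List Int) (max_k : Int) (out : List (String × Int)) : Decidable (Spec_get_in_k_counters ground_truth predictions max_k out) := by unfold Spec_get_in_k_counters; infer_instance

-- ===== CLAIM (what is proved, stated in full; the proofs are below) =====
def Claim_equal_get_in_k_counters : Prop := ∀ (ground_truth : List Int) (predictions : List Int) (max_k : Int), Dom_get_in_k_counters ground_truth predictions max_k → Spec_get_in_k_counters ground_truth predictions max_k (get_in_k_counters ground_truth predictions max_k)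

-- ===== LEMMAS AND PROOFS =====

-- the first-occurrence dict looks up exactly List.index? (shifted by the enumerate start)
theorem pvFirst_fold_get (predictions : List Int) (s : Int) (d : PySem.Dict Int Int) (t : Int) :
    ((PySem.List.enumerate predictions s).foldl
        (fun d ip => if d.contains ip.2 then d else d.insert ip.2 ip.1) d).get? t
      = (d.get? t).or ((PySem.List.index? predictions t).map (fun n => s + (n : Int))) := by
  induction predictions generalizing s d with
  | nil =>
      simp [PySem.List.enumerate_nil, PySem.List.index?_eq_idxOf?]
  | cons p ps ih =>
      rw [PySem.List.enumerate_cons, List.foldl_cons]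
      by_cases hc : d.contains p = true
      · rw [if_pos hc, ih]
        obtain ⟨v, hv⟩ : ∃ v, d.get? p = some v := by
          rcases hd : d.get? p with _ | v
          · rw [PySem.Dict.get?_eq_none_iff_contains] at hd; simp [hc] at hd
          · exact ⟨v, rfl⟩
        by_cases ht : p = t
        · subst ht; rw [hv]; simp
        · rw [PySem.List.index?_cons_of_ne ps ht]
          congr 1
          cases hidx : PySem.List.index? ps t with
          | none => rfl
          | some n => simp; try omega
      · rw [if_neg hc, ih]
        have hd : d.get? p = none :=
          (PySem.Dict.get?_eq_none_iff_contains d p).mpr (by simpa using hc)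
        by_cases ht : p = t
        · subst ht
          rw [PySem.Dict.get?_insert_self, hd, PySem.List.index?_cons_self]
          simp
        · have hne : t ≠ p := fun h => ht h.symm
          rw [PySem.Dict.get?_insert_of_ne d s hne, PySem.List.index?_cons_of_ne ps ht]
          congr 1
          cases hidx : PySem.List.index? ps t with
          | none => rfl
          | some n => simp; try omega

theorem pvFirstIdx_get (predictions : List Int) (t : Int) :
    (pvFirstIdx predictions).get? t
      = (PySem.List.index? predictions t).map (fun n => (n : Int)) := by
  unfold pvFirstIdx
  rw [pvFirst_fold_get]
  simp

-- the `needed` fold with a none accumulator stays none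
theorem pvNeeded_none (first : PySem.Dict Int Int) (gt : List Int) :
    gt.foldl (fun acc t =>
      match first.get? t, acc with
      | some i, some m => some (max m (i + 1))
      | _, _ => none) none = none := by
  induction gt with
  | nil => rfl
  | cons t rest ih =>
      simp only [List.foldl_cons]
      cases first.get? t <;> exact ih

-- characterisation of "needed ≤ c" through the fold
theorem pvNeeded_fold_le (first : PySem.Dict Int Int) (gt : List Int) (m c : Int) :
    ((match gt.foldl (fun acc t =>
        match first.get? t, acc with
        | some i, some m => some (max m (i + 1))
        | _, _ => none) (some m) with
      | some M => decide (M ≤ c)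
      | none => false) = true)
    ↔ (m ≤ c ∧ ∀ t ∈ gt, ∃ i, first.get? t = some i ∧ i + 1 ≤ c) := by
  induction gt generalizing m with
  | nil => simp
  | cons t rest ih =>
      cases hg : first.get? t with
      | none =>
          simp only [List.foldl_cons, hg]
          rw [pvNeeded_none]
          simp only [Bool.false_eq_true, false_iff, not_and]
          intro _ hall
          rcases hall t (by simp) with ⟨i, hi, -⟩
          rw [hg] at hi
          simp at hi
      | some i =>
          simp only [List.foldl_cons, hg]
          rw [ih]
          constructor
          · rintro ⟨hm, hrest⟩
            refine ⟨by omega, ?_⟩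
            intro x hx
            rcases List.mem_cons.mp hx with rfl | hx'
            · exact ⟨i, hg, by omega⟩
            · exact hrest x hx'
          · rintro ⟨hm, hall⟩
            refine ⟨?_, fun x hx => hall x (List.mem_cons_of_mem _ hx)⟩
            rcases hall t (by simp) with ⟨i', hi', hle⟩
            rw [hg] at hi'
            cases hi'
            omega

-- membership in a prefix in terms of the first-occurrence index
theorem pv_mem_take_iff (pred : List Int) (t : Int) (n : Nat) :
    t ∈ pred.take n ↔ ∃ j, PySem.List.index? pred t = some j ∧ j < n := by
  induction pred generalizing n with
  | nil => simp [PySem.List.index?_eq_idxOf?]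
  | cons p ps ih =>
      cases n with
      | zero => simp
      | succ n =>
          simp only [List.take_succ_cons, List.mem_cons]
          by_cases ht : p = t
          · subst ht
            rw [PySem.List.index?_cons_self]
            simp
          · rw [PySem.List.index?_cons_of_ne ps ht]
            constructor
            · rintro (h | h)
              · exact absurd h.symm ht
              · rcases (ih n).mp h with ⟨j, hj, hlt⟩
                exact ⟨j + 1, by rw [hj]; rfl, by omega⟩
            · rintro ⟨j, hj, hlt⟩
              cases hidx : PySem.List.index? ps t with
              | none => rw [hidx] at hj; simp at hj
              | some j' =>
                  rw [hidx] at hj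
                  simp only [Option.map_some, Option.some.injEq] at hj
                  exact Or.inr ((ih n).mpr ⟨j', hidx, by omega⟩)

-- the per-k boolean of A equals B's comparison of `needed` with the prefix length
theorem pv_bool_eq (gt pred : List Int) (c : Int) (hc : 0 ≤ c) :
    (gt.all (fun t => decide (t ∈ PySem.List.slice pred none (some c))))
      = (match pvNeeded (pvFirstIdx pred) gt with
         | some m => decide (m ≤ c)
         | none => false) := by
  rw [Bool.eq_iff_iff, PySem.List.slice_to _ hc]
  unfold pvNeeded
  rw [pvNeeded_fold_le]
  simp only [List.all_eq_true, decide_eq_true_eq]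
  constructor
  · intro h
    refine ⟨hc, fun t ht => ?_⟩
    rcases (pv_mem_take_iff pred t c.toNat).mp (h t ht) with ⟨j, hj, hlt⟩
    refine ⟨(j : Int), ?_, by omega⟩
    rw [pvFirstIdx_get, hj]
    rfl
  · rintro ⟨-, hall⟩ t ht
    rcases hall t ht with ⟨i, hi, hle⟩
    rw [pvFirstIdx_get] at hi
    cases hj : PySem.List.index? pred t with
    | none => rw [hj] at hi; simp at hi
    | some j =>
        rw [hj] at hi
        simp at hi
        exact (pv_mem_take_iff pred t c.toNat).mpr ⟨j, hj, by omega⟩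

-- ===== VERDICT (by name: the statement is the Claim_ definition above) =====
theorem get_in_k_counters_spec : Claim_equal_get_in_k_counters := by
  intro gt pred mk _
  unfold Spec_get_in_k_counters get_in_k_counters get_in_k_counters_alt
  congr 1
  apply PySem.List.foldl_congr_mem
  intro d k hk
  have h1 : 1 ≤ k := (PySem.List.mem_pyRange_one.mp hk).1
  have hc : 0 ≤ min (PySem.List.len pred) (PySem.List.len gt + (k - 1)) := by
    simp only [PySem.List.len_eq]
    omega
  rw [pv_bool_eq gt pred _ hc]
  cases hn : pvNeeded (pvFirstIdx pred) gt with
  | none => rw [if_neg (by simp)]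
  | some m =>
      by_cases hm : m ≤ min (PySem.List.len pred) (PySem.List.len gt + (k - 1))
      · rw [if_pos (by simpa using hm)]; congr 1; simp
        simp only [PySem.List.len_eq] at hm; omega
      · rw [if_neg (by simpa using hm)]; congr 1; simp
        simp only [PySem.List.len_eq] at hm; omega
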